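-- pv_equiv track=rewrite | github.com/matthewdeanmartin/safari_writer | safari_slides/parser.py | _split_slide_sections
-- ===== SOURCE A (Python) =====
-- def _parse_metadata(block: str) -> dict[str, str]:
--     data: dict[str, str] = {}
--     for raw_line in block.splitlines():
--         line = raw_line.strip()
--         if not line:
--             continue
--         if ":" not in line:
--             return {}
--         key, value = line.split(":", 1)
--         data[key.strip().lower()] = value.strip().strip('"').strip("'")
--     return data
--
-- def _split_slide_sections(text: str) -> list[tuple[str, int, int]]:
--     if not text.strip():
--         return []
--     sections: list[tuple[str, int, int]] = []
--     buffer: list[str] = []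
--     horizontal_index = 1
--     vertical_index = 1
--     in_code_fence = False
--     for raw_line in text.splitlines():
--         stripped = raw_line.strip()
--         if stripped.startswith("```"):
--             in_code_fence = not in_code_fence
--         if not in_code_fence and stripped in {"---", "----"}:
--             section_text = "\n".join(buffer).strip("\n")
--             if section_text:
--                 sections.append((section_text, horizontal_index, vertical_index))
--             buffer = []
--             if stripped == "---":
--                 horizontal_index += 1
--                 vertical_index = 1
--             else:
--                 vertical_index += 1
--             continue
--         buffer.append(raw_line)
--     tail = "\n".join(buffer).strip("\n")
--     if tail:
--         sections.append((tail, horizontal_index, vertical_index))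
--     merged_sections: list[tuple[str, int, int]] = []
--     pending_metadata: tuple[str, int, int] | None = None
--     for section_text, section_horizontal, section_vertical in sections:
--         if _is_metadata_section(section_text):
--             pending_metadata = (section_text, section_horizontal, section_vertical)
--             continue
--         if pending_metadata is not None:
--             metadata_text, meta_horizontal, meta_vertical = pending_metadata
--             section_text = f"---\n{metadata_text}\n---\n\n{section_text}"
--             merged_sections.append((section_text, meta_horizontal, meta_vertical))
--             pending_metadata = None
--             continue
--         merged_sections.append((section_text, section_horizontal, section_vertical))
--     if pending_metadata is not None:
--         metadata_text, meta_horizontal, meta_vertical = pending_metadata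
--         merged_sections.append(
--             (f"---\n{metadata_text}\n---", meta_horizontal, meta_vertical)
--         )
--     return merged_sections
--
-- def _is_metadata_section(section_text: str) -> bool:
--     lines = [line.strip() for line in section_text.splitlines() if line.strip()]
--     if not lines:
--         return False
--     if any(line.startswith(("#", "-", "*", "+", ">")) for line in lines):
--         return False
--     return bool(_parse_metadata("\n".join(lines)))
-- ===== SOURCE B (Python) =====
-- def _is_metadata_section(section_text: str) -> bool:
--     seen = False
--     for raw_line in section_text.splitlines():
--         line = raw_line.strip()
--         if not line:
--             continue
--         if line.startswith(("#", "-", "*", "+", ">")):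
--             return False
--         if ":" not in line:
--             return False
--         seen = True
--     return seen
--
--
-- def _split_slide_sections(text: str) -> list[tuple[str, int, int]]:
--     if not text.strip():
--         return []
--     merged: list[tuple[str, int, int]] = []
--     pending: tuple[str, int, int] | None = None
--
--     def emit(section_text: str, h: int, v: int) -> None:
--         nonlocal pending
--         if _is_metadata_section(section_text):
--             pending = (section_text, h, v)
--         elif pending is not None:
--             metadata_text, meta_h, meta_v = pending
--             merged.append((f"---\n{metadata_text}\n---\n\n{section_text}", meta_h, meta_v))
--             pending = None
--         else:
--             merged.append((section_text, h, v))
--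
--     buffer: list[str] = []
--     horizontal_index = 1
--     vertical_index = 1
--     in_code_fence = False
--     for raw_line in text.splitlines():
--         stripped = raw_line.strip()
--         if stripped.startswith("```"):
--             in_code_fence = not in_code_fence
--         if not in_code_fence and stripped in ("---", "----"):
--             section_text = "\n".join(buffer).strip("\n")
--             if section_text:
--                 emit(section_text, horizontal_index, vertical_index)
--             buffer = []
--             if stripped == "---":
--                 horizontal_index += 1
--                 vertical_index = 1
--             else:
--                 vertical_index += 1
--         else:
--             buffer.append(raw_line)
--     tail = "\n".join(buffer).strip("\n")
--     if tail:
--         emit(tail, horizontal_index, vertical_index)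
--     if pending is not None:
--         metadata_text, meta_h, meta_v = pending
--         merged.append((f"---\n{metadata_text}\n---", meta_h, meta_v))
--     return merged
-- ===== Notes on version B (the rewrite author's own statement) =====
-- stated objective: alternative
-- what changed: A first builds the full list of raw sections and then runs a second merge pass pairing metadata sections with the following slide; B fuses both phases into one pass over the lines, classifying each section the moment its separator closes it and keeping a single pending-metadata slot, with a one-pass early-exit metadata classifier instead of A's filter+rejoin+reparse pipeline.
import Mathlib
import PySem

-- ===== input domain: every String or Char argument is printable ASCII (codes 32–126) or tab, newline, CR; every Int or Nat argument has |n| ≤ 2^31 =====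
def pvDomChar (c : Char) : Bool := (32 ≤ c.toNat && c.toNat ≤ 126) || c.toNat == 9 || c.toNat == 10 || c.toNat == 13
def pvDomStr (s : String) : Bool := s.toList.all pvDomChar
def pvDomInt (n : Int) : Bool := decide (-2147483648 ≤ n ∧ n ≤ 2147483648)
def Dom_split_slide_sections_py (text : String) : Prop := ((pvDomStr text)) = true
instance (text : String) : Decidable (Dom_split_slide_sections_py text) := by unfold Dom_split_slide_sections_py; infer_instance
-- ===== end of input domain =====

-- B replaces A's two-phase build-then-merge with a single fused pass (pending-metadata slot filled
-- as each section closes) and a one-pass early-exit metadata classifier; objective: alternative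
-- decomposition, same asymptotic cost.

-- ===== PORT A =====

-- _parse_metadata: loop over block.splitlines() building a dict; `return {}` on a colon-less line
def parse_metadata_go : List String → PySem.Dict String String → PySem.Dict String String
  | [], data => data
  | raw :: rest, data =>
    let line := PySem.Str.strip raw
    if line = "" then parse_metadata_go rest data
    else if PySem.Str.isIn ":" line = false then PySem.Dict.mk []
    else
      match PySem.Str.splitMax? line ":" 1 with
      | some (key :: value :: _) =>
        parse_metadata_go rest (data.insert (PySem.Str.lower (PySem.Str.strip key))
          (PySem.Str.stripChars (PySem.Str.stripChars (PySem.Str.strip value) "\"") "'"))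
      | _ => PySem.Dict.mk []  -- unreachable: ":" is in line, so split(":", 1) has two parts

def parse_metadata (block : String) : PySem.Dict String String :=
  parse_metadata_go (PySem.Str.splitlines block) (PySem.Dict.mk [])

def is_metadata_section (section_text : String) : Bool :=
  let lines := ((PySem.Str.splitlines section_text).map PySem.Str.strip).filter (fun l => l ≠ "")
  if lines.isEmpty then false
  else if lines.any (fun l => PySem.Str.startswith l "#" || PySem.Str.startswith l "-" ||
      PySem.Str.startswith l "*" || PySem.Str.startswith l "+" || PySem.Str.startswith l ">") then
    false
  else !(parse_metadata (PySem.Str.join "\n" lines)).items.isEmpty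

-- first loop of A: collect raw sections; state (sections, buffer, horizontal, vertical, in_code_fence)
def stepA (st : List (String × Int × Int) × List String × Int × Int × Bool) (raw : String) :
    List (String × Int × Int) × List String × Int × Int × Bool :=
  match st with
  | (sections, buffer, h, v, fence0) =>
    let stripped := PySem.Str.strip raw
    let fence := if PySem.Str.startswith stripped "```" then !fence0 else fence0
    if fence = false ∧ (stripped = "---" ∨ stripped = "----") then
      let sec := PySem.Str.stripChars (PySem.Str.join "\n" buffer) "\n"
      let sections' := if sec = "" then sections else sections ++ [(sec, h, v)]
      if stripped = "---" then (sections', [], h + 1, 1, fence)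
      else (sections', [], h, v + 1, fence)
    else (sections, buffer ++ [raw], h, v, fence)

-- second loop of A: merge a pending metadata section into the following section
def stepMerge (st : List (String × Int × Int) × Option (String × Int × Int))
    (sec : String × Int × Int) : List (String × Int × Int) × Option (String × Int × Int) :=
  match st, sec with
  | (merged, pending), (stext, sh, sv) =>
    if is_metadata_section stext then (merged, some (stext, sh, sv))
    else
      match pending with
      | some (mt, mh, mv) => (merged ++ [("---\n" ++ mt ++ "\n---\n\n" ++ stext, mh, mv)], none)
      | none => (merged ++ [(stext, sh, sv)], none)

def split_slide_sections_py (text : String) : List (String × Int × Int) :=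
  if PySem.Str.strip text = "" then []
  else
    let r := (PySem.Str.splitlines text).foldl stepA ([], [], 1, 1, false)
    let tail := PySem.Str.stripChars (PySem.Str.join "\n" r.2.1) "\n"
    let sections := if tail = "" then r.1 else r.1 ++ [(tail, r.2.2.1, r.2.2.2.1)]
    let m := sections.foldl stepMerge ([], none)
    match m.2 with
    | some (mt, mh, mv) => m.1 ++ [("---\n" ++ mt ++ "\n---", mh, mv)]
    | none => m.1

-- ===== PORT B =====

-- one-pass early-exit classifier: seen := at least one nonempty stripped line so far
def metaGoB : List String → Bool → Bool
  | [], seen => seen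
  | raw :: rest, seen =>
    let line := PySem.Str.strip raw
    if line = "" then metaGoB rest seen
    else if PySem.Str.startswith line "#" || PySem.Str.startswith line "-" ||
        PySem.Str.startswith line "*" || PySem.Str.startswith line "+" ||
        PySem.Str.startswith line ">" then false
    else if PySem.Str.isIn ":" line = false then false
    else metaGoB rest true

def is_metadata_section_b (section_text : String) : Bool :=
  metaGoB (PySem.Str.splitlines section_text) false

-- emit(section_text, h, v): classify the closed section immediately, keep one pending slot
def emitB (merged : List (String × Int × Int)) (pending : Option (String × Int × Int))
    (sec : String) (h v : Int) : List (String × Int × Int) × Option (String × Int × Int) :=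
  if is_metadata_section_b sec then (merged, some (sec, h, v))
  else
    match pending with
    | some (mt, mh, mv) => (merged ++ [("---\n" ++ mt ++ "\n---\n\n" ++ sec, mh, mv)], none)
    | none => (merged ++ [(sec, h, v)], none)

-- the single fused pass: state ((merged, pending), buffer, horizontal, vertical, in_code_fence)
def stepB (st : (List (String × Int × Int) × Option (String × Int × Int)) × List String × Int × Int × Bool)
    (raw : String) :
    (List (String × Int × Int) × Option (String × Int × Int)) × List String × Int × Int × Bool :=
  match st with
  | ((merged, pending), buffer, h, v, fence0) =>
    let stripped := PySem.Str.strip raw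
    let fence := if PySem.Str.startswith stripped "```" then !fence0 else fence0
    if fence = false ∧ (stripped = "---" ∨ stripped = "----") then
      let sec := PySem.Str.stripChars (PySem.Str.join "\n" buffer) "\n"
      let mp := if sec = "" then (merged, pending) else emitB merged pending sec h v
      if stripped = "---" then (mp, [], h + 1, 1, fence)
      else (mp, [], h, v + 1, fence)
    else ((merged, pending), buffer ++ [raw], h, v, fence)

def split_slide_sections_py_alt (text : String) : List (String × Int × Int) :=
  if PySem.Str.strip text = "" then []
  else
    let r := (PySem.Str.splitlines text).foldl stepB (([], none), [], 1, 1, false)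
    let tail := PySem.Str.stripChars (PySem.Str.join "\n" r.2.1) "\n"
    let mp := if tail = "" then r.1 else emitB r.1.1 r.1.2 tail r.2.2.1 r.2.2.2.1
    match mp.2 with
    | some (mt, mh, mv) => mp.1 ++ [("---\n" ++ mt ++ "\n---", mh, mv)]
    | none => mp.1

-- ===== PRECONDITION & SPEC =====
def Spec_split_slide_sections_py (text : String) (out : List (String × Int × Int)) : Prop :=
  out = split_slide_sections_py_alt text
instance (text : String) (out : List (String × Int × Int)) :
    Decidable (Spec_split_slide_sections_py text out) := by
  unfold Spec_split_slide_sections_py; infer_instance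

-- ===== CLAIM (what is proved, stated in full; the proofs are below) =====
def Claim_equal_split_slide_sections_py : Prop :=
  ∀ (text : String), Dom_split_slide_sections_py text →
    Spec_split_slide_sections_py text (split_slide_sections_py text)

-- ===== LEMMAS AND PROOFS =====

-- the line-break predicate splitlines uses, written out
def pvIsB (c : Char) : Bool :=
  decide (c.toNat = 10) || decide (c.toNat = 13) || decide (c.toNat = 11) || decide (c.toNat = 12) ||
  decide (c.toNat = 28) || decide (c.toNat = 29) || decide (c.toNat = 30) || decide (c.toNat = 133) ||
  decide (c.toNat = 8232) || decide (c.toNat = 8233)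

theorem splitlines_eq_go (cs : List Char) :
    PySem.Chars.splitlines cs = PySem.Chars.splitlines.go pvIsB cs [] [] := rfl

theorem go_cons_nb (c : Char) (hc : pvIsB c = false) (cs cur acc) :
    PySem.Chars.splitlines.go pvIsB (c :: cs) cur acc =
      PySem.Chars.splitlines.go pvIsB cs (c :: cur) acc := by
  have h13 : c ≠ '\x0d' := by rintro rfl; simp [pvIsB] at hc
  rw [PySem.Chars.splitlines.go.eq_def]
  split <;> simp_all

theorem go_break (c : Char) (hc : pvIsB c = true) (h13 : c ≠ '\x0d') (cs cur acc) :
    PySem.Chars.splitlines.go pvIsB (c :: cs) cur acc =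
      PySem.Chars.splitlines.go pvIsB cs [] (cur.reverse :: acc) := by
  rw [PySem.Chars.splitlines.go.eq_def]
  split <;> simp_all

theorem go_piece (piece : List Char) (hp : ∀ c ∈ piece, pvIsB c = false) (rest cur acc) :
    PySem.Chars.splitlines.go pvIsB (piece ++ rest) cur acc =
      PySem.Chars.splitlines.go pvIsB rest (piece.reverse ++ cur) acc := by
  induction piece generalizing cur with
  | nil => simp
  | cons c p ih =>
    rw [List.cons_append, go_cons_nb c (hp c (by simp)) _ cur acc, ih (fun x hx => hp x (by simp [hx]))]
    simp

theorem split_join_chars (lines : List (List Char)) (h1 : lines ≠ [])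
    (h2 : ∀ l ∈ lines, l ≠ [] ∧ ∀ c ∈ l, pvIsB c = false) (acc) :
    PySem.Chars.splitlines.go pvIsB (PySem.Chars.join ['\n'] lines) [] acc = acc.reverse ++ lines := by
  induction lines generalizing acc with
  | nil => exact absurd rfl h1
  | cons l ls ih =>
    rcases ls with _ | ⟨l2, ls⟩
    · rw [PySem.Chars.join_singleton]
      have := go_piece l (h2 l (by simp)).2 [] [] acc
      simp only [List.append_nil] at this
      rw [this, PySem.Chars.splitlines.go.eq_def]
      have hl : l ≠ [] := (h2 l (by simp)).1
      simp [hl]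
    · rw [PySem.Chars.join_cons_cons, List.append_assoc,
        go_piece l (h2 l (by simp)).2 _ [] acc]
      show PySem.Chars.splitlines.go pvIsB ('\n' :: PySem.Chars.join ['\n'] (l2 :: ls))
          (l.reverse ++ []) acc = _
      rw [go_break '\n' (by decide) (by decide)]
      simp only [List.append_nil, List.reverse_reverse]
      rw [ih (by simp) (fun x hx => h2 x (by simp [hx]))]
      simp

theorem go_nb (s cur acc) (hcur : ∀ c ∈ cur, pvIsB c = false)
    (hacc : ∀ p ∈ acc, ∀ c ∈ p, pvIsB c = false) :
    ∀ p ∈ PySem.Chars.splitlines.go pvIsB s cur acc, ∀ c ∈ p, pvIsB c = false := by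
  fun_induction PySem.Chars.splitlines.go pvIsB s cur acc with
  | case1 cur acc h => simpa using hacc
  | case2 cur acc h =>
    intro p hp
    rcases (by simpa using hp : p ∈ acc ∨ p = cur.reverse) with h' | h'
    · exact hacc p h'
    · subst h'; intro c hc; exact hcur c (by simpa using hc)
  | case3 rest cur acc ih =>
    refine ih (by simp) ?_
    intro p hp
    rcases List.mem_cons.mp hp with h' | h'
    · subst h'; intro c hc; exact hcur c (by simpa using hc)
    · exact hacc p h'
  | case4 c rest cur acc hne hB ih =>
    refine ih (by simp) ?_
    intro p hp
    rcases List.mem_cons.mp hp with h' | h'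
    · subst h'; intro x hx; exact hcur x (by simpa using hx)
    · exact hacc p h'
  | case5 c rest cur acc hne hB ih =>
    refine ih ?_ hacc
    intro x hx
    rcases List.mem_cons.mp hx with h' | h'
    · subst h'; simpa using hB
    · exact hcur x h' 

theorem splitlines_nb (cs : List Char) :
    ∀ p ∈ PySem.Chars.splitlines cs, ∀ c ∈ p, pvIsB c = false := by
  rw [splitlines_eq_go]
  exact go_nb cs [] [] (by simp) (by simp)

theorem mem_strip_chars {c : Char} {l : List Char} (h : c ∈ PySem.Chars.strip l) : c ∈ l := by
  simp only [PySem.Chars.strip, PySem.Chars.rstrip, PySem.Chars.lstrip, List.mem_reverse] at h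
  have h1 := (List.dropWhile_sublist (p := PySem.Chars.isspace)
    (l := (List.dropWhile PySem.Chars.isspace l).reverse)).subset h
  rw [List.mem_reverse] at h1
  exact (List.dropWhile_sublist (p := PySem.Chars.isspace) (l := l)).subset h1

theorem dropWhile_rdropWhile_dropWhile (p : Char → Bool) (l : List Char) :
    List.dropWhile p (List.rdropWhile p (List.dropWhile p l)) = List.rdropWhile p (List.dropWhile p l) := by
  rw [List.dropWhile_eq_self_iff]
  intro hl
  have hpref := List.rdropWhile_prefix p (List.dropWhile p l)
  rw [hpref.getElem hl]
  exact List.dropWhile_eq_self_iff.mp (List.dropWhile_idempotent p l)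
    (lt_of_lt_of_le hl hpref.length_le)

theorem strip_idem_chars (l : List Char) :
    PySem.Chars.strip (PySem.Chars.strip l) = PySem.Chars.strip l := by
  show List.rdropWhile _ (List.dropWhile _ (List.rdropWhile _ (List.dropWhile _ l))) = _
  rw [dropWhile_rdropWhile_dropWhile, List.rdropWhile_idempotent]
  rfl

theorem str_strip_idem (s : String) : PySem.Str.strip (PySem.Str.strip s) = PySem.Str.strip s := by
  apply String.toList_inj.mp
  simp only [PySem.Str.toList_strip]
  exact strip_idem_chars _

theorem str_mem_strip {c : Char} {s : String} (h : c ∈ (PySem.Str.strip s).toList) : c ∈ s.toList := by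
  rw [PySem.Str.toList_strip] at h
  exact mem_strip_chars h

theorem goM0 (sep : List Char) (fuel : Nat) (l cur : List Char) (acc : List (List Char)) :
    PySem.Chars.splitOnMax.go sep fuel 0 l cur acc = acc.reverse ++ [cur.reverse ++ l] := by
  rw [PySem.Chars.splitOnMax.go.eq_def]
  rcases fuel with _ | fuel
  · simp
  · rcases l with _ | ⟨c, rest⟩ <;> simp

theorem goM1 (fuel : Nat) : ∀ (l cur : List Char) (acc : List (List Char)),
    l.length < fuel → ':' ∈ l →
    ∃ a b, PySem.Chars.splitOnMax.go [':'] fuel 1 l cur acc = acc.reverse ++ [a, b] := by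
  induction fuel with
  | zero => intro l cur acc h; omega
  | succ fuel ih =>
    intro l cur acc hlen hmem
    rcases l with _ | ⟨c, rest⟩
    · simp at hmem
    · rw [PySem.Chars.splitOnMax.go.eq_def]
      simp only []
      by_cases hpre : [':'].isPrefixOf (c :: rest) = true
      · refine ⟨cur.reverse, rest, ?_⟩
        simp only [hpre, if_true, if_neg (by omega : ¬(1:Nat) = 0)]
        rw [goM0]
        simp
      · have hc : c ≠ ':' := by
          intro hcc; subst hcc; simp [List.isPrefixOf] at hpre
        have hmem' : ':' ∈ rest := by
          rcases List.mem_cons.mp hmem with h | h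
          · exact absurd h.symm hc
          · exact h
        obtain ⟨a, b, hab⟩ := ih rest (c :: cur) acc (by simpa using Nat.lt_of_succ_lt_succ hlen) hmem'
        refine ⟨a, b, ?_⟩
        simp only [hpre, if_neg (by omega : ¬(1:Nat) = 0)]
        simpa using hab

theorem splitMax_colon (t : String) (h : PySem.Str.isIn ":" t = true) :
    ∃ a b : String, PySem.Str.splitMax? t ":" 1 = some [a, b] := by
  have hmem : ':' ∈ t.toList := by
    have h2 : PySem.Chars.isIn [':'] t.toList = true := by simpa using h
    exact (List.singleton_infix_iff ':' t.toList).mp (PySem.Chars.isIn_iff_infix (sub := [':']) (s := t.toList) |>.mp h2)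
  obtain ⟨a, b, hab⟩ := goM1 (t.toList.length + 1) t.toList [] [] (by omega) hmem
  refine ⟨String.ofList a, String.ofList b, ?_⟩
  show Option.map _ (PySem.Chars.splitMax? t.toList ":".toList 1) = _
  have : ":".toList = [':'] := rfl
  rw [this]
  show Option.map _ (if ([':'] : List Char).isEmpty = true then none
    else some (PySem.Chars.splitOnMax t.toList [':'] 1)) = _
  simp only [show ([':'] : List Char).isEmpty = false from rfl, Bool.false_eq_true, if_false]
  show Option.map _ (some (if (1:Int) < 0 then _ else
    PySem.Chars.splitOnMax.go [':'] (t.toList.length + 1) (1:Int).toNat t.toList [] [])) = _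
  rw [if_neg (by omega)]
  show some (List.map String.ofList (PySem.Chars.splitOnMax.go [':'] (t.toList.length + 1) 1 t.toList [] [])) = _
  rw [hab]
  simp

theorem insert_items_ne_nil (d : PySem.Dict String String) (k v : String) :
    (d.insert k v).items ≠ [] := by
  unfold PySem.Dict.insert
  split
  · rename_i hc
    unfold PySem.Dict.contains at hc
    intro hnil
    simp only [] at hnil
    rw [List.map_eq_nil_iff] at hnil
    simp [hnil] at hc
  · simp

theorem split_join_str (lines : List String) (h1 : lines ≠ [])
    (h2 : ∀ l ∈ lines, l ≠ "" ∧ ∀ c ∈ l.toList, pvIsB c = false) :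
    PySem.Str.splitlines (PySem.Str.join "\n" lines) = lines := by
  simp only [PySem.Str.splitlines, PySem.Str.join, String.toList_ofList]
  have hn : "\n".toList = ['\n'] := rfl
  have hpieces : ∀ l ∈ lines.map String.toList, l ≠ [] ∧ ∀ c ∈ l, pvIsB c = false := by
    intro l hl
    rw [List.mem_map] at hl
    obtain ⟨t, ht, rfl⟩ := hl
    exact ⟨by simpa using (h2 t ht).1, (h2 t ht).2⟩
  rw [hn, splitlines_eq_go, split_join_chars (lines.map String.toList)
      (by simpa using h1) hpieces []]
  simp [Function.comp_def]

theorem parse_go_char (lines : List String)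
    (h : ∀ t ∈ lines, PySem.Str.strip t = t ∧ t ≠ "") (d : PySem.Dict String String) :
    (!(parse_metadata_go lines d).items.isEmpty) =
      (lines.all (fun t => PySem.Str.isIn ":" t) && (!d.items.isEmpty || !lines.isEmpty)) := by
  induction lines generalizing d with
  | nil => simp [parse_metadata_go]
  | cons t rest ih =>
    have ht := h t (by simp)
    rw [parse_metadata_go]
    simp only [ht.1, if_neg ht.2]
    cases hcolon : PySem.Str.isIn ":" t with
    | false =>
      have hc2 : PySem.Chars.isIn [':'] t.toList = false := by simpa using hcolon
      rw [if_pos rfl]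
      simp [hc2]
    | true =>
      have hc2 : PySem.Chars.isIn [':'] t.toList = true := by simpa using hcolon
      obtain ⟨a, b, hab⟩ := splitMax_colon t hcolon
      rw [if_neg (by simp), hab]
      rw [ih (fun x hx => h x (List.mem_cons_of_mem _ hx))]
      simp [hc2, insert_items_ne_nil]

-- proof-side abbreviations for the metadata characterisation
def pvMarker (t : String) : Bool :=
  PySem.Str.startswith t "#" || PySem.Str.startswith t "-" || PySem.Str.startswith t "*" ||
  PySem.Str.startswith t "+" || PySem.Str.startswith t ">"

def pvCleaned (L : List String) : List String :=
  (L.map PySem.Str.strip).filter (fun l => l ≠ "")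

def pvOk (t : String) : Bool := !pvMarker t && PySem.Str.isIn ":" t

theorem metaGoB_char (L : List String) (seen : Bool) :
    metaGoB L seen = ((pvCleaned L).all pvOk && (seen || !(pvCleaned L).isEmpty)) := by
  induction L generalizing seen with
  | nil => simp [metaGoB, pvCleaned]
  | cons raw rest ih =>
    rw [metaGoB]
    by_cases hs : PySem.Str.strip raw = ""
    · rw [if_pos hs]
      have : pvCleaned (raw :: rest) = pvCleaned rest := by simp [pvCleaned, hs]
      rw [this, ih]
    · rw [if_neg hs]
      have hcl : pvCleaned (raw :: rest) = PySem.Str.strip raw :: pvCleaned rest := by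
        simp [pvCleaned, hs]
      rw [hcl]
      by_cases hm : pvMarker (PySem.Str.strip raw) = true
      · rw [if_pos (by simpa [pvMarker, Bool.or_assoc] using hm)]
        simp [pvOk, hm]
      · rw [if_neg (by simpa [pvMarker, Bool.or_assoc] using hm)]
        cases hcolon : PySem.Str.isIn ":" (PySem.Str.strip raw) with
        | false =>
          have hc2 : PySem.Chars.isIn [':'] (PySem.Chars.strip raw.toList) = false := by
            simpa using hcolon
          simp [hc2, pvOk, Bool.eq_false_iff.mpr hm]
        | true =>
          have hc2 : PySem.Chars.isIn [':'] (PySem.Chars.strip raw.toList) = true := by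
            simpa using hcolon
          rw [if_neg (by simp), ih]
          simp [pvOk, hc2, Bool.eq_false_iff.mpr hm]

theorem cleaned_props (s : String) :
    ∀ t ∈ pvCleaned (PySem.Str.splitlines s),
      t ≠ "" ∧ PySem.Str.strip t = t ∧ ∀ c ∈ t.toList, pvIsB c = false := by
  intro t ht
  simp only [pvCleaned, List.mem_filter, List.mem_map] at ht
  obtain ⟨⟨piece, hpiece, rfl⟩, hne⟩ := ht
  refine ⟨by simpa using hne, str_strip_idem piece, ?_⟩
  intro c hc
  have hc2 : c ∈ piece.toList := str_mem_strip hc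
  have hp : piece.toList ∈ PySem.Chars.splitlines s.toList := by
    simp only [PySem.Str.splitlines, List.mem_map] at hpiece
    obtain ⟨p, hp, rfl⟩ := hpiece
    simpa using hp
  exact splitlines_nb s.toList piece.toList hp c hc2

theorem is_meta_char (s : String) :
    is_metadata_section s =
      ((pvCleaned (PySem.Str.splitlines s)).all pvOk && !(pvCleaned (PySem.Str.splitlines s)).isEmpty) := by
  rw [is_metadata_section]
  have hcl : ((PySem.Str.splitlines s).map PySem.Str.strip).filter (fun l => l ≠ "") =
      pvCleaned (PySem.Str.splitlines s) := rfl
  rw [hcl]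
  set lines := pvCleaned (PySem.Str.splitlines s) with hlines
  by_cases hemp : lines.isEmpty
  · simp [hemp]
  · rw [if_neg hemp]
    by_cases hany : lines.any (fun l => PySem.Str.startswith l "#" || PySem.Str.startswith l "-" ||
        PySem.Str.startswith l "*" || PySem.Str.startswith l "+" || PySem.Str.startswith l ">") = true
    · rw [if_pos hany]
      rw [List.any_eq_true] at hany
      obtain ⟨t, ht, hmt⟩ := hany
      have : lines.all pvOk = false := by
        rw [List.all_eq_false]
        have hmt' : pvMarker t = true := hmt
        exact ⟨t, ht, by simp [pvOk, hmt']⟩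
      simp [this]
    · rw [if_neg hany]
      have hnomark : ∀ t ∈ lines, pvMarker t = false := by
        intro t ht
        rw [Bool.eq_false_iff]
        intro hmt
        exact hany (List.any_eq_true.mpr ⟨t, ht, by simpa [pvMarker, Bool.or_assoc] using hmt⟩)
      have hprops := cleaned_props s
      rw [← hlines] at hprops
      have hsplit : PySem.Str.splitlines (PySem.Str.join "\n" lines) = lines := by
        refine split_join_str lines (by simpa using hemp) ?_
        intro l hl
        exact ⟨(hprops l hl).1, (hprops l hl).2.2⟩
      rw [parse_metadata, hsplit,
        parse_go_char lines (fun t ht => ⟨(hprops t ht).2.1, (hprops t ht).1⟩) _]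
      simp only [List.isEmpty_nil]
      have : lines.all pvOk = lines.all (fun t => PySem.Str.isIn ":" t) := by
        cases hall : lines.all (fun t => PySem.Str.isIn ":" t) with
        | true =>
          rw [List.all_eq_true] at hall ⊢
          intro t ht
          have hc := hall t ht
          simp only [] at hc
          have hcc : PySem.Chars.isIn [':'] t.toList = true := by simpa using hc
          simp [pvOk, hnomark t ht, hcc]
        | false =>
          rw [List.all_eq_false] at hall ⊢
          obtain ⟨t, ht, hf⟩ := hall
          have hfc : PySem.Chars.isIn [':'] t.toList = false := by simpa using hf
          exact ⟨t, ht, by simp [pvOk, hfc]⟩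
      rw [this]
      simp [hemp]

theorem meta_eq (s : String) : is_metadata_section_b s = is_metadata_section s := by
  rw [is_metadata_section_b, metaGoB_char, is_meta_char]
  simp

theorem emitB_eq (m : List (String × Int × Int)) (p : Option (String × Int × Int))
    (sec : String) (h v : Int) :
    emitB m p sec h v = stepMerge (m, p) (sec, h, v) := by
  unfold emitB stepMerge
  rw [meta_eq]

theorem stepA_fst (s0 secs : List (String × Int × Int)) (buf : List String) (h v : Int)
    (f : Bool) (raw : String) :
    stepA (s0 ++ secs, buf, h, v, f) raw =
      (s0 ++ (stepA (secs, buf, h, v, f) raw).1, (stepA (secs, buf, h, v, f) raw).2) := by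
  simp only [stepA]
  split_ifs <;> simp

theorem stepA_pre (lines : List String) :
    ∀ (s0 secs : List (String × Int × Int)) (buf : List String) (h v : Int) (f : Bool),
    lines.foldl stepA (s0 ++ secs, buf, h, v, f) =
      (s0 ++ (lines.foldl stepA (secs, buf, h, v, f)).1,
        (lines.foldl stepA (secs, buf, h, v, f)).2) := by
  induction lines with
  | nil => intro s0 secs buf h v f; simp
  | cons raw rest ih =>
    intro s0 secs buf h v f
    simp only [List.foldl_cons]
    rw [stepA_fst]
    rcases hst : stepA (secs, buf, h, v, f) raw with ⟨secs', buf', h', v', f'⟩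
    exact ih s0 secs' buf' h' v' f'

theorem stepA_single (rest : List String) (x : String × Int × Int) (buf : List String)
    (h v : Int) (f : Bool) :
    List.foldl stepA ([x], buf, h, v, f) rest =
      (x :: (List.foldl stepA ([], buf, h, v, f) rest).1,
        (List.foldl stepA ([], buf, h, v, f) rest).2) := by
  have := stepA_pre rest [x] [] buf h v f
  simpa using this

theorem fuse (lines : List String) :
    ∀ (m : List (String × Int × Int)) (p : Option (String × Int × Int)) (buf : List String)
      (h v : Int) (f : Bool),
    lines.foldl stepB ((m, p), buf, h, v, f) =
      ((lines.foldl stepA ([], buf, h, v, f)).1.foldl stepMerge (m, p),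
        (lines.foldl stepA ([], buf, h, v, f)).2) := by
  induction lines with
  | nil => intro m p buf h v f; simp
  | cons raw rest ih =>
    intro m p buf h v f
    simp only [List.foldl_cons, stepA, stepB]
    by_cases hc : ((if PySem.Str.startswith (PySem.Str.strip raw) "```" then !f else f) = false ∧
        (PySem.Str.strip raw = "---" ∨ PySem.Str.strip raw = "----"))
    · rw [if_pos hc, if_pos hc]
      by_cases hs : PySem.Str.stripChars (PySem.Str.join "\n" buf) "\n" = ""
      · rw [if_pos hs, if_pos hs]
        by_cases hdash : PySem.Str.strip raw = "---"
        · rw [if_pos hdash, if_pos hdash]; exact ih m p [] (h + 1) 1 _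
        · rw [if_neg hdash, if_neg hdash]; exact ih m p [] h (v + 1) _
      · rw [if_neg hs, if_neg hs]
        rcases hmp : emitB m p (PySem.Str.stripChars (PySem.Str.join "\n" buf) "\n") h v
          with ⟨m', p'⟩
        have hmerge : stepMerge (m, p)
            ((PySem.Str.stripChars (PySem.Str.join "\n" buf) "\n"), h, v) = (m', p') := by
          rw [← emitB_eq, hmp]
        by_cases hdash : PySem.Str.strip raw = "---"
        · rw [if_pos hdash, if_pos hdash, ih m' p' [] (h + 1) 1]
          simp only [List.nil_append]
          rw [stepA_single]
          simp [hmerge]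
        · rw [if_neg hdash, if_neg hdash, ih m' p' [] h (v + 1)]
          simp only [List.nil_append]
          rw [stepA_single]
          simp [hmerge]
    · rw [if_neg hc, if_neg hc]
      exact ih m p (buf ++ [raw]) h v _

-- ===== VERDICT (by name: the statement is the Claim_ definition above) =====
theorem split_slide_sections_py_spec : Claim_equal_split_slide_sections_py := by
  unfold Claim_equal_split_slide_sections_py
  intro text _
  unfold Spec_split_slide_sections_py
  rw [split_slide_sections_py_alt, split_slide_sections_py]
  by_cases h0 : PySem.Str.strip text = ""
  · rw [if_pos h0, if_pos h0]
  · rw [if_neg h0, if_neg h0]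
    simp only [fuse]
    by_cases ht : PySem.Str.stripChars (PySem.Str.join "\n"
        ((PySem.Str.splitlines text).foldl stepA ([], [], 1, 1, false)).2.1) "\n" = ""
    · rw [if_pos ht, if_pos ht]
    · rw [if_neg ht, if_neg ht, emitB_eq, List.foldl_append]
      simp
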